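-- pv_equiv track=rewrite | github.com/wooya315/programmers | 문자열 내림차순.py | solution
-- ===== SOURCE A (Python) =====
-- def solution(s):
--     answer = []
--     upper = []
--     for i in s:
--         if i.islower() == True:
--             answer.append(i)
--             answer.sort(reverse=True)
--         else:
--             upper.append(i)
--             upper.sort(reverse=True)
--     answer = "".join(answer)
--     upper = "".join(upper)
--     return answer + upper
-- ===== SOURCE B (Python) =====
-- def solution(s):
--     return "".join(sorted(s, key=lambda c: (c.islower(), c), reverse=True))
-- ===== Notes on version B (the rewrite author's own statement) =====
-- stated objective: simpler
-- what changed: Replaced A's loop that partitions characters into two buckets and re-sorts the touched bucket after every single append with one call to sorted() over the whole string using the composite key (c.islower(), c) and reverse=True, then a single join.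
import Mathlib
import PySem

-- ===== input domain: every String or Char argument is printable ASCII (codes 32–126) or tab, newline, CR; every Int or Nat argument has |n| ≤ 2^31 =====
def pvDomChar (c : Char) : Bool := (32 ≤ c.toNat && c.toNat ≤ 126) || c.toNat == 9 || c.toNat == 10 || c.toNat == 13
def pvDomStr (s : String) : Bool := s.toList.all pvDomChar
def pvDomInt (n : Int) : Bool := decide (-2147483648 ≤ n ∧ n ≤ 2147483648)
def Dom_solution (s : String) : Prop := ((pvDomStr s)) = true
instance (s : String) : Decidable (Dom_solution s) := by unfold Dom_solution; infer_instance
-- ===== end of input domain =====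

-- B replaces A's two-bucket partition (with a full re-sort after every append) by one keyed sort
-- of the whole string: simpler, one pass through sorted().

-- ===== PORT A =====
def solution (s : String) : String :=
  let p := s.toList.foldl (fun (st : List Char × List Char) i =>
      if PySem.Chars.islower i = true then
        (PySem.List.sorted (st.1 ++ [i]) (fun x => x) true, st.2)
      else
        (st.1, PySem.List.sorted (st.2 ++ [i]) (fun x => x) true)) ([], [])
  String.ofList p.1 ++ String.ofList p.2

-- ===== PORT B =====
def solution_alt (s : String) : String :=
  String.ofList (PySem.List.sorted2 s.toList PySem.Chars.islower (fun c => c) true)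

-- ===== PRECONDITION & SPEC =====
def Spec_solution (s : String) (out : String) : Prop := out = solution_alt s
instance (s : String) (out : String) : Decidable (Spec_solution s out) := by unfold Spec_solution; infer_instance

-- ===== CLAIM (what is proved, stated in full; the proofs are below) =====
def Claim_equal_solution : Prop := ∀ (s : String), Dom_solution s → Spec_solution s (solution s)

-- ===== LEMMAS AND PROOFS =====

-- the composite key (islower c, c) encoded into Nat (characters are < 2^24)
def pvKey (c : Char) : Nat := (cond (PySem.Chars.islower c) 16777216 0) + c.toNat

theorem pvChar_toNat_lt (c : Char) : c.toNat < 16777216 := by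
  have := c.valid
  unfold Char.toNat
  rcases this with h | h
  · exact Nat.lt_trans h (by norm_num)
  · exact Nat.lt_trans h.2 (by norm_num)

theorem pvKey_inj : Function.Injective pvKey := by
  intro a b h
  have ha := pvChar_toNat_lt a
  have hb := pvChar_toNat_lt b
  unfold pvKey at h
  have htn : a.toNat = b.toNat := by
    cases hla : PySem.Chars.islower a <;> cases hlb : PySem.Chars.islower b <;>
      simp [hla, hlb] at h <;> omega
  have : a.val = b.val := by
    apply UInt32.toNat_inj.mp
    exact htn
  exact Char.ext this

-- descending sort (key = identity) only depends on the multiset of elements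
theorem pvSrev_congr (xs ys : List Char) (h : xs.Perm ys) :
    PySem.List.sorted xs (fun x => x) true = PySem.List.sorted ys (fun x => x) true := by
  apply List.eq_of_perm_of_sorted (le := fun a b => b ≤ a)
  · intro a b _ _ h1 h2; exact le_antisymm h2 h1
  · exact PySem.List.sorted_pairwise_rev xs (fun x => x)
  · exact PySem.List.sorted_pairwise_rev ys (fun x => x)
  · exact ((PySem.List.sorted_perm xs _ true).trans h).trans
      (PySem.List.sorted_perm ys _ true).symm

-- A's loop invariant: the two accumulators are the descending sorts of the buckets so far
theorem pvLoopA (l : List Char) (a u : List Char) :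
    l.foldl (fun (st : List Char × List Char) i =>
      if PySem.Chars.islower i = true then
        (PySem.List.sorted (st.1 ++ [i]) (fun x => x) true, st.2)
      else
        (st.1, PySem.List.sorted (st.2 ++ [i]) (fun x => x) true))
      (PySem.List.sorted a (fun x => x) true, PySem.List.sorted u (fun x => x) true)
    = (PySem.List.sorted (a ++ l.filter PySem.Chars.islower) (fun x => x) true,
       PySem.List.sorted (u ++ l.filter (fun c => !PySem.Chars.islower c)) (fun x => x) true) := by
  induction l generalizing a u with
  | nil => simp
  | cons x l ih =>
    simp only [List.foldl_cons]
    cases hx : PySem.Chars.islower x with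
    | true =>
      rw [if_pos rfl]
      have h1 : PySem.List.sorted (PySem.List.sorted a (fun x => x) true ++ [x]) (fun x => x) true
          = PySem.List.sorted (a ++ [x]) (fun x => x) true :=
        pvSrev_congr _ _ ((PySem.List.sorted_perm a _ true).append_right [x])
      rw [h1, ih (a ++ [x]) u]
      simp [hx, List.append_assoc]
    | false =>
      rw [if_neg (by simp)]
      have h1 : PySem.List.sorted (PySem.List.sorted u (fun x => x) true ++ [x]) (fun x => x) true
          = PySem.List.sorted (u ++ [x]) (fun x => x) true :=
        pvSrev_congr _ _ ((PySem.List.sorted_perm u _ true).append_right [x])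
      rw [h1, ih a (u ++ [x])]
      simp [hx, List.append_assoc]

-- the tuple comparison of B's key equals the Nat comparison of pvKey
theorem pvLt_eq (a b : Char) :
    (decide (PySem.Chars.islower a < PySem.Chars.islower b) ||
      (!decide (PySem.Chars.islower b < PySem.Chars.islower a) && decide (a < b)))
    = decide (pvKey a < pvKey b) := by
  have ha := pvChar_toNat_lt a
  have hb := pvChar_toNat_lt b
  have hcl : (a < b) ↔ a.toNat < b.toNat := Iff.rfl
  cases hla : PySem.Chars.islower a <;> cases hlb : PySem.Chars.islower b <;>
    simp [pvKey, hla, hlb, hcl, Bool.lt_iff] <;> omega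

-- B's sorted2 with key (islower c, c) is sorted with key pvKey
theorem pvB_eq_sortedKey (xs : List Char) :
    PySem.List.sorted2 xs PySem.Chars.islower (fun c => c) true
    = PySem.List.sorted xs pvKey true := by
  rw [PySem.List.sorted_rev_eq_foldl_insertBy]
  show List.foldl (fun acc x => PySem.List.insertBy _ x acc) [] xs = _
  congr 1
  funext acc x
  congr 1
  funext p q
  exact pvLt_eq q p

-- partition-then-sort equals the single keyed sort
theorem pvMain (xs : List Char) :
    PySem.List.sorted (xs.filter PySem.Chars.islower) (fun x => x) true ++
      PySem.List.sorted (xs.filter (fun c => !PySem.Chars.islower c)) (fun x => x) true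
    = PySem.List.sorted xs pvKey true := by
  apply Eq.symm
  apply List.eq_of_perm_of_sorted (le := fun a b => pvKey b ≤ pvKey a)
  · intro a b _ _ h1 h2; exact pvKey_inj (le_antisymm h2 h1)
  · exact PySem.List.sorted_pairwise_rev xs pvKey
  · rw [List.pairwise_append]
    refine ⟨?_, ?_, ?_⟩
    · refine (PySem.List.sorted_pairwise_rev _ (fun x => x)).imp_of_mem ?_
      intro a b hma hmb h
      have hla : PySem.Chars.islower a = true :=
        (List.mem_filter.mp ((PySem.List.mem_sorted _ _ _ a).mp hma)).2
      have hlb : PySem.Chars.islower b = true :=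
        (List.mem_filter.mp ((PySem.List.mem_sorted _ _ _ b).mp hmb)).2
      have : b.toNat ≤ a.toNat := h
      simp [pvKey, hla, hlb]; omega
    · refine (PySem.List.sorted_pairwise_rev _ (fun x => x)).imp_of_mem ?_
      intro a b hma hmb h
      have hla : PySem.Chars.islower a = false := by
        have := (List.mem_filter.mp ((PySem.List.mem_sorted _ _ _ a).mp hma)).2
        simpa using this
      have hlb : PySem.Chars.islower b = false := by
        have := (List.mem_filter.mp ((PySem.List.mem_sorted _ _ _ b).mp hmb)).2
        simpa using this
      have : b.toNat ≤ a.toNat := h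
      simp [pvKey, hla, hlb]; omega
    · intro a hma b hmb
      have hla : PySem.Chars.islower a = true :=
        (List.mem_filter.mp ((PySem.List.mem_sorted _ _ _ a).mp hma)).2
      have hlb : PySem.Chars.islower b = false := by
        have := (List.mem_filter.mp ((PySem.List.mem_sorted _ _ _ b).mp hmb)).2
        simpa using this
      have := pvChar_toNat_lt b
      simp [pvKey, hla, hlb]; omega
  · refine (PySem.List.sorted_perm xs pvKey true).trans ?_
    refine ((List.filter_append_perm PySem.Chars.islower xs).symm).trans ?_
    exact ((PySem.List.sorted_perm _ _ true).symm.append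
      (PySem.List.sorted_perm _ _ true).symm)

-- ===== VERDICT (by name: the statement is the Claim_ definition above) =====
theorem solution_spec : Claim_equal_solution := by
  intro s _
  show solution s = solution_alt s
  unfold solution solution_alt
  have h0 : (([], []) : List Char × List Char)
      = (PySem.List.sorted [] (fun x : Char => x) true,
         PySem.List.sorted [] (fun x : Char => x) true) := rfl
  rw [h0, pvLoopA, pvB_eq_sortedKey, ← pvMain]
  simp only [List.nil_append]
  exact Eq.symm String.ofList_append
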